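-- pv_equiv track=rewrite | github.com/vidithbalasa/Transformer | tensor.py | matmul_4d
-- ===== SOURCE A (Python) =====
-- import math
--
-- def shape(l: list) -> tuple:
--     '''
--     Recursively returns the shape of an n-dimensional list.
--     '''
--     if not isinstance(l[0], list):
--         return (len(l),)
--     return (len(l),) + shape(l[0])
--
-- def reshape_flattened_nd(l: list, og_shape: tuple) -> list:
--     '''
--     Reshape a flattened list into an n-dimensional list.
--     '''
--     matrix = l.copy()
--     if shape(matrix) == og_shape:
--         return matrix
--     if len(og_shape) == 1:
--         return matrix
--     splits = math.ceil(len(matrix) / og_shape[0])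
--     return [reshape_flattened_nd(matrix[x:x+splits], og_shape[1:]) for x in range(0, len(matrix), splits)]
--
-- def matmul_4d(a: list, b: list) -> list:
--     '''
--     Matrix multiplication of two 4-dimensional tensors.
--
--     Matrix math from "Multidimensional Matrix Math" by Ashu M. G. Solo:
--     http://www.iaeng.org/publication/WCE2010/WCE2010_pp1829-1833.pdf
--
--     Requirements
--     --------------------------------------------------------------
--     1. A_y == B_x
--     2. Every dimension above y is the same length for both matrices (e.g. A_i == B_i for all i > y)
--
--     Returns
--     --------------------------------------------------------------
--     C_{ijkl} = \sum_{x=0}^{len(a_i)}{a_{ixkl} * b_{xjkl}}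
--     '''
--     a_shape, b_shape = shape(a), shape(b)
--     assert a_shape[-1] == b_shape[-2], "Y dimension of matrix A must match X dimension of matrix B"
--     assert a_shape[:-2] == b_shape[:-2], "3rd and 4th dimensions of matrix A must match 3rd and 4th dimensions of matrix B"
--
--     new_shape = (a_shape[0], a_shape[1], a_shape[2], b_shape[-1])
--     zeros = zeros_from(new_shape)
--
--     for l in range(new_shape[0]):
--         for k in range(new_shape[1]):
--             for i in range(new_shape[2]):
--                 for j in range(new_shape[3]):
--                     zeros[l][k][i][j] = sum([a[l][k][i][x] * b[l][k][x][j] for x in range(len(a[l][k][i]))])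
--
--     return zeros
--
-- def zeros_from(shape: tuple) -> list:
--     '''
--     Returns a list of zeros with the given shape.
--     '''
--     zeros = [0] * math.prod(shape)
--     return reshape_flattened_nd(zeros, shape)
-- ===== SOURCE B (Python) =====
-- def shape(l: list) -> tuple:
--     '''
--     Recursively returns the shape of an n-dimensional list.
--     '''
--     if not isinstance(l[0], list):
--         return (len(l),)
--     return (len(l),) + shape(l[0])
--
-- def matmul_4d(a: list, b: list) -> list:
--     '''
--     Matrix multiplication of two 4-dimensional tensors, computed per batch cell
--     as a sum of rank-1 (outer-product) updates: C = sum_x col_x(A) (x) row_x(B).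
--     No dot products are formed; a whole accumulator matrix is updated per x.
--     Exact for ints since the x-accumulation order is ascending, as in A's sums.
--     '''
--     a_shape, b_shape = shape(a), shape(b)
--     assert a_shape[-1] == b_shape[-2], "Y dimension of matrix A must match X dimension of matrix B"
--     assert a_shape[:-2] == b_shape[:-2], "3rd and 4th dimensions of matrix A must match 3rd and 4th dimensions of matrix B"
--
--     def axpy(acc_row, s, b_row):
--         return [u + s * v for u, v in zip(acc_row, b_row)]
--
--     def mat2(m_a, m_b):
--         p = len(m_b[0])
--         acc = [[0] * p for _ in m_a]
--         for x, b_row in enumerate(m_b):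
--             acc = [axpy(acc_row, a_row[x], b_row)
--                    for acc_row, a_row in zip(acc, m_a)]
--         return acc
--
--     return [[mat2(a2, b2) for a2, b2 in zip(a3, b3)] for a3, b3 in zip(a, b)]
-- ===== Notes on version B (the rewrite author's own statement) =====
-- stated objective: alternative
-- what changed: Instead of preallocating a zeros tensor via flat-list reshape and filling each scalar entry with a row-by-column dot product in four nested index loops, B computes each batch cell's 2D product as an accumulation of rank-1 (outer-product) updates: it walks B's rows once, and for each x adds a[i][x]*b_row to every accumulator row, never forming a dot product; the batch dimensions are walked by zip comprehension.
-- outside the precondition, e.g. on matmul_4d([[[[1, 2], [3]]]], [[[[1, 0], [0, 1]]]]): A returns [[[[1, 2], [3, 0]]]], B raises IndexError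
import Mathlib
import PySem

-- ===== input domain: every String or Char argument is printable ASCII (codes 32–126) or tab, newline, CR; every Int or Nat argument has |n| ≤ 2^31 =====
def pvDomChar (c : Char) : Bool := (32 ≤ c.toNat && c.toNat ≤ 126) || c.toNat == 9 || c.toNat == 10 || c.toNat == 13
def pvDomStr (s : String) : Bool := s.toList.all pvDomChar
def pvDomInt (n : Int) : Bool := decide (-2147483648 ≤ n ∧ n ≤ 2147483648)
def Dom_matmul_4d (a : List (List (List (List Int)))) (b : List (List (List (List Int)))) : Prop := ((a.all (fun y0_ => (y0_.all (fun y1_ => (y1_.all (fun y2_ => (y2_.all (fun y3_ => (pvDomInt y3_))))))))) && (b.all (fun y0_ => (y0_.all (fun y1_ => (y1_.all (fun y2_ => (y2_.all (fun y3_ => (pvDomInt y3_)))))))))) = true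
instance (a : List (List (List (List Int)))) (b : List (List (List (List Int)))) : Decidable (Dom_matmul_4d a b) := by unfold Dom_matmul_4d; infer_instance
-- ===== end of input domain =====

-- B replaces A's preallocate-zeros-and-fill four nested scalar loops by per-batch-cell
-- rank-1 (outer-product) accumulation over B's rows: a different algorithm of the same cost.


-- ===== PORT A =====
-- shape(l) for a 4-dimensional list: (len l, len l[0], len l[0][0], len l[0][0][0]);
-- none exactly where Python's l[0] raises IndexError (an empty level).
def pvShape4 (l : List (List (List (List Int)))) : Option (Nat × Nat × Nat × Nat) :=
  match PySem.List.pyGet? l 0 with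
  | none => none
  | some l3 =>
    match PySem.List.pyGet? l3 0 with
    | none => none
    | some l2 =>
      match PySem.List.pyGet? l2 0 with
      | none => none
      | some l1 => some (l.length, l3.length, l2.length, l1.length)

-- math.ceil(n / m) for nonnegative ints (exact for the list sizes admitted by Dom_, far below 2^53)
def pvCeil (n m : Nat) : Nat := (n + m - 1) / m

-- [f(matrix[x:x+splits]) for x in range(0, len(matrix), splits)]
def pvChunksMap {α : Type} (m : List Int) (splits : Nat) (f : List Int → α) : List α :=
  (PySem.List.pyRange 0 (m.length : Int) (splits : Int)).map
    (fun x => f (PySem.List.slice m (some x) (some (x + (splits : Int)))))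

-- reshape_flattened_nd specialised to the tuple lengths it is called at (the flat argument is a
-- list of ints, so the `shape(matrix) == og_shape` early return coincides with the
-- `len(og_shape) == 1` return; an empty flat list makes shape() raise — excluded by Pre_).
def pvReshape2 (m : List Int) (d0 : Nat) : List (List Int) :=
  pvChunksMap m (pvCeil m.length d0) (fun c => c)
def pvReshape3 (m : List Int) (d0 d1 : Nat) : List (List (List Int)) :=
  pvChunksMap m (pvCeil m.length d0) (fun c => pvReshape2 c d1)
def pvReshape4 (m : List Int) (d0 d1 d2 : Nat) : List (List (List (List Int))) :=
  pvChunksMap m (pvCeil m.length d0) (fun c => pvReshape3 c d1 d2)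

-- zeros_from((d0, d1, d2, d3))
def pvZeros4 (d0 d1 d2 d3 : Nat) : List (List (List (List Int))) :=
  pvReshape4 (List.replicate (d0 * d1 * d2 * d3) 0) d0 d1 d2

-- zeros[l][k][i][j] = v  (indices in range inside Pre_; Python raises IndexError out of range)
def pvSet4 (z : List (List (List (List Int)))) (l k i j : Nat) (v : Int) :
    List (List (List (List Int))) :=
  z.modify l (fun z3 => z3.modify k (fun z2 => z2.modify i (fun row => row.set j v)))

-- sum([a[l][k][i][x] * b[l][k][x][j] for x in range(len(a[l][k][i]))])
-- (loop indices come from range() and are nonnegative; inside Pre_ every access is in range,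
--  so the getD defaults are never read)
def pvEntryA (a b : List (List (List (List Int)))) (l k i j : Nat) : Int :=
  let row := ((a.getD l []).getD k []).getD i []
  ((List.range row.length).map
      (fun x => row.getD x 0 * (((b.getD l []).getD k []).getD x []).getD j 0)).foldl
    (fun s v => s + v) 0

def matmul_4d (a : List (List (List (List Int)))) (b : List (List (List (List Int)))) :
    List (List (List (List Int))) :=
  match pvShape4 a, pvShape4 b with
  | some (L, K, M, _N), some (L2, K2, N2, P) =>
    -- the two asserts; Python raises AssertionError when they fail (excluded by Pre_)
    if _N == N2 && (L == L2 && K == K2) then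
      (List.range L).foldl (fun z l =>
        (List.range K).foldl (fun z k =>
          (List.range M).foldl (fun z i =>
            (List.range P).foldl (fun z j =>
              pvSet4 z l k i j (pvEntryA a b l k i j)) z) z) z)
        (pvZeros4 L K M P)
    else []
  | _, _ => []  -- IndexError inside shape(): excluded by Pre_

-- ===== PORT B =====
-- B's own shape(l) for a 4-dimensional list (same reading as A's but B-side)
def pvShapeB4 (l : List (List (List (List Int)))) : Option (Nat × Nat × Nat × Nat) :=
  (PySem.List.pyGet? l 0).bind fun l3 =>
    (PySem.List.pyGet? l3 0).bind fun l2 =>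
      (PySem.List.pyGet? l2 0).map fun l1 => (l.length, l3.length, l2.length, l1.length)

-- axpy(acc_row, s, b_row) = [u + s * v for u, v in zip(acc_row, b_row)]
def pvAxpy (accRow : List Int) (s : Int) (bRow : List Int) : List Int :=
  (accRow.zip bRow).map (fun p => p.1 + s * p.2)

-- mat2(m_a, m_b): rank-1 accumulation over enumerate(m_b).
-- len(m_b[0]) raises IndexError on empty m_b, and a_row[x] raises on a ragged/short row —
-- both excluded by Pre_, so the getD defaults below are never read there.
def pvMat2B (ma mb : List (List Int)) : List (List Int) :=
  let p := (mb.getD 0 []).length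
  let init := ma.map (fun _ => List.replicate p (0 : Int))
  mb.zipIdx.foldl
    (fun acc bx =>
      (acc.zip ma).map (fun q => pvAxpy q.1 (q.2.getD bx.2 0) bx.1)) init

def matmul_4d_alt (a : List (List (List (List Int)))) (b : List (List (List (List Int)))) :
    List (List (List (List Int))) :=
  (((pvShapeB4 a).bind fun sa => (pvShapeB4 b).map fun sb =>
    -- the two asserts (AssertionError outside Pre_); sa = (L,K,M,N), sb = (L2,K2,N2,P2)
    if sa.2.2.2 == sb.2.2.1 && (sa.1 == sb.1 && sa.2.1 == sb.2.1) then
      (a.zip b).map (fun p => (p.1.zip p.2).map (fun q => pvMat2B q.1 q.2))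
    else []).getD [])  -- none = IndexError inside shape(): excluded by Pre_

-- ===== PRECONDITION & SPEC =====
-- t is a full (rectangular) L x K x M x N tensor
def pvRect4 (t : List (List (List (List Int)))) (L K M N : Nat) : Bool :=
  t.length == L &&
    t.all (fun m3 => m3.length == K &&
      m3.all (fun m2 => m2.length == M && m2.all (fun r => r.length == N)))

-- Pre_ admits exactly the rectangular, everywhere-nonempty pairs of 4D tensors with matching
-- (L,K,M,N) x (L,K,N,P) dimensions. It excludes ragged inputs: shape() inspects only first
-- elements there, so A's behaviour (an IndexError or a silently truncated product) is an
-- accident of its implementation.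
def Pre_matmul_4d (a : List (List (List (List Int)))) (b : List (List (List (List Int)))) : Prop :=
  pvRect4 a a.length (a.getD 0 []).length ((a.getD 0 []).getD 0 []).length
      (((a.getD 0 []).getD 0 []).getD 0 []).length = true ∧
  pvRect4 b a.length (a.getD 0 []).length (((a.getD 0 []).getD 0 []).getD 0 []).length
      (((b.getD 0 []).getD 0 []).getD 0 []).length = true ∧
  0 < a.length ∧ 0 < (a.getD 0 []).length ∧ 0 < ((a.getD 0 []).getD 0 []).length ∧
  0 < (((a.getD 0 []).getD 0 []).getD 0 []).length ∧
  0 < (((b.getD 0 []).getD 0 []).getD 0 []).length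
instance (a : List (List (List (List Int)))) (b : List (List (List (List Int)))) : Decidable (Pre_matmul_4d a b) := by unfold Pre_matmul_4d; infer_instance

def pvWitness_matmul_4d : List (List (List (List Int))) × List (List (List (List Int))) :=
  ([[[[1, 2]], [[3, 4]]]], [[[[5], [6]], [[7], [8]]]])

def Spec_matmul_4d (a : List (List (List (List Int)))) (b : List (List (List (List Int)))) (out : List (List (List (List Int)))) : Prop := out = matmul_4d_alt a b
instance (a : List (List (List (List Int)))) (b : List (List (List (List Int)))) (out : List (List (List (List Int)))) : Decidable (Spec_matmul_4d a b out) := by unfold Spec_matmul_4d; infer_instance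

-- ===== CLAIM (what is proved, stated in full; the proofs are below) =====
def Claim_equal_matmul_4d : Prop := ∀ (a : List (List (List (List Int)))) (b : List (List (List (List Int)))), Dom_matmul_4d a b → Pre_matmul_4d a b → Spec_matmul_4d a b (matmul_4d a b)

-- ===== LEMMAS AND PROOFS =====

-- the common canonical form both ports are reduced to
def pvCanon (a b : List (List (List (List Int)))) (L K M P : Nat) :
    List (List (List (List Int))) :=
  (List.range L).map (fun l => (List.range K).map (fun k =>
    (List.range M).map (fun i => (List.range P).map (fun j => pvEntryA a b l k i j))))

theorem pv_modify_id {α : Type} (z : List α) (n : Nat) : z.modify n (fun y => y) = z := by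
  induction z generalizing n with
  | nil => simp
  | cons x t ih =>
    cases n with
    | zero => simp
    | succ n => simpa using ih n

theorem pv_modify_modify {α : Type} (z : List α) (n : Nat) (f g : α → α) :
    (z.modify n f).modify n g = z.modify n (fun x => g (f x)) := by
  induction z generalizing n with
  | nil => simp
  | cons x t ih =>
    cases n with
    | zero => simp
    | succ n => simpa using ih n

theorem pv_foldl_modify {α β : Type} (xs : List β) (n : Nat) (g : β → α → α) (z : List α) :
    xs.foldl (fun z j => z.modify n (g j)) z
      = z.modify n (fun y => xs.foldl (fun y j => g j y) y) := by
  induction xs generalizing z with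
  | nil => simp [pv_modify_id]
  | cons j t ih =>
    simp only [List.foldl_cons]
    rw [ih, pv_modify_modify]

theorem pv_modify_append_cons {α : Type} (A : List α) (x : α) (B : List α) (f : α → α)
    (n : Nat) (h : n = A.length) : (A ++ x :: B).modify n f = A ++ f x :: B := by
  subst h
  induction A with
  | nil => simp
  | cons a A ih => simpa using ih

theorem pv_foldl_modify_range_aux {α : Type} [Inhabited α] (g : Nat → α → α) (m : Nat)
    (z : List α) (h : m ≤ z.length) :
    (List.range m).foldl (fun z i => z.modify i (g i)) z
      = (List.range m).map (fun i => g i (z.getD i default)) ++ z.drop m := by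
  induction m with
  | zero => simp
  | succ m ih =>
    rw [List.range_succ, List.foldl_append, ih (by omega)]
    simp only [List.foldl_cons, List.foldl_nil, List.map_append, List.map_cons, List.map_nil]
    have hm : m < z.length := by omega
    have hlen : m = (List.map (fun i => g i (z.getD i default)) (List.range m)).length := by simp
    rw [List.drop_eq_getElem_cons hm,
      pv_modify_append_cons _ _ _ _ _ hlen,
      List.getD_eq_getElem z default hm]
    simp

theorem pv_foldl_modify_range {α : Type} [Inhabited α] (g : Nat → α → α) (m : Nat) (z : List α)
    (h : z.length = m) :
    (List.range m).foldl (fun z i => z.modify i (g i)) z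
      = (List.range m).map (fun i => g i (z.getD i default)) := by
  rw [pv_foldl_modify_range_aux g m z (by omega)]
  simp [h]

theorem pv_map_eq_range_getD {α β : Type} (d : α) (f : α → β) (l : List α) :
    l.map f = (List.range l.length).map (fun i => f (l.getD i d)) := by
  apply List.ext_getElem
  · simp
  · intro i h1 h2
    have hi : i < l.length := by simpa using h1
    simp [List.getElem?_eq_getElem hi]

theorem pv_A_core (e : Nat → Nat → Nat → Nat → Int) (L K M P : Nat) :
    (List.range L).foldl (fun z l =>
        (List.range K).foldl (fun z k =>
          (List.range M).foldl (fun z i =>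
            (List.range P).foldl (fun z j =>
              pvSet4 z l k i j (e l k i j)) z) z) z)
      (List.replicate L (List.replicate K (List.replicate M (List.replicate P (0 : Int)))))
      = (List.range L).map (fun l => (List.range K).map (fun k =>
          (List.range M).map (fun i => (List.range P).map (fun j => e l k i j)))) := by
  simp only [pvSet4]
  simp only [pv_foldl_modify]
  rw [pv_foldl_modify_range _ L _ (by simp)]
  apply List.map_congr_left
  intro l hl
  rw [show (default : List (List (List Int))) = [] from rfl,
    List.getD_replicate _ (List.mem_range.mp hl)]
  rw [pv_foldl_modify_range _ K _ (by simp)]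
  apply List.map_congr_left
  intro k hk
  rw [show (default : List (List Int)) = [] from rfl,
    List.getD_replicate _ (List.mem_range.mp hk)]
  rw [pv_foldl_modify_range _ M _ (by simp)]
  apply List.map_congr_left
  intro i hi
  rw [show (default : List Int) = [] from rfl,
    List.getD_replicate _ (List.mem_range.mp hi)]
  simp only [List.set_eq_modify]
  rw [pv_foldl_modify_range _ P _ (by simp)]

theorem pv_ceil_mul (d q : Nat) (hd : 0 < d) : pvCeil (d * q) d = q := by
  unfold pvCeil
  rw [show d * q + d - 1 = d * q + (d - 1) by omega, Nat.mul_add_div hd,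
    Nat.div_eq_of_lt (by omega)]
  omega

theorem pv_chunk_replicate {α : Type} (n s : Nat) (c : Int) (hs : 0 < s) (f : List Int → α) :
    pvChunksMap (List.replicate (n * s) c) s f = List.replicate n (f (List.replicate s c)) := by
  unfold pvChunksMap
  rw [List.length_replicate]
  rw [PySem.List.pyRange_of_pos _ _ (by exact_mod_cast hs)]
  rcases Nat.eq_zero_or_pos n with hn | hn
  · subst hn; simp
  · have hpos : (0 : Int) < ((n * s : Nat) : Int) := by
      have : 0 < n * s := Nat.mul_pos hn hs
      exact_mod_cast this
    rw [if_pos hpos]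
    have h1 : ((n * s : Nat) : Int) - 0 + (s : Int) - 1 = ((n * s + s - 1 : Nat) : Int) := by
      push_cast; omega
    rw [h1, show ((s : Nat) : Int) = ((s : Nat) : Int) from rfl, ← Int.natCast_div,
      Int.toNat_natCast]
    have h2 : (n * s + s - 1) / s = n := by
      rw [show n * s + s - 1 = s * n + (s - 1) by rw [Nat.mul_comm]; omega,
        Nat.mul_add_div hs, Nat.div_eq_of_lt (by omega)]
      omega
    rw [h2, List.map_map]
    refine List.eq_replicate_iff.mpr ⟨by simp, ?_⟩
    intro x hx
    rcases List.mem_map.mp hx with ⟨k, hk, hkx⟩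
    have hkn : k < n := List.mem_range.mp hk
    subst hkx
    simp only [Function.comp_apply]
    have e1 : (0 : Int) + (s : Int) * (k : Int) = ((s * k : Nat) : Int) := by push_cast; ring
    rw [e1]
    rw [show ((s * k : Nat) : Int) + (s : Int) = ((s * k : Nat) : Int) + ((s : Nat) : Int) from rfl]
    rw [PySem.List.slice_natCast_add]
    rw [List.drop_replicate, List.take_replicate]
    have h3 : s * k + s ≤ n * s := by nlinarith
    rw [Nat.min_eq_left (by omega)]

theorem pv_reshape2_rep (M P : Nat) (hM : 0 < M) (hP : 0 < P) :
    pvReshape2 (List.replicate (M * P) 0) M = List.replicate M (List.replicate P 0) := by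
  unfold pvReshape2
  rw [List.length_replicate, pv_ceil_mul M P hM]
  exact pv_chunk_replicate M P 0 hP _

theorem pv_reshape3_rep (K M P : Nat) (hK : 0 < K) (hM : 0 < M) (hP : 0 < P) :
    pvReshape3 (List.replicate (K * (M * P)) 0) K M
      = List.replicate K (List.replicate M (List.replicate P 0)) := by
  unfold pvReshape3
  rw [List.length_replicate, pv_ceil_mul K (M * P) hK]
  rw [pv_chunk_replicate K (M * P) 0 (Nat.mul_pos hM hP) _]
  rw [pv_reshape2_rep M P hM hP]

theorem pv_zeros4 (L K M P : Nat) (hL : 0 < L) (hK : 0 < K) (hM : 0 < M) (hP : 0 < P) :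
    pvZeros4 L K M P
      = List.replicate L (List.replicate K (List.replicate M (List.replicate P 0))) := by
  unfold pvZeros4 pvReshape4
  rw [show L * K * M * P = L * (K * (M * P)) by ring]
  rw [List.length_replicate, pv_ceil_mul L (K * (M * P)) hL]
  rw [pv_chunk_replicate L (K * (M * P)) 0 (Nat.mul_pos hK (Nat.mul_pos hM hP)) _]
  rw [pv_reshape3_rep K M P hK hM hP]

theorem pv_shape4_eq (t : List (List (List (List Int))))
    (h1 : 0 < t.length) (h2 : 0 < (t.getD 0 []).length)
    (h3 : 0 < ((t.getD 0 []).getD 0 []).length) :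
    pvShape4 t = some (t.length, (t.getD 0 []).length, ((t.getD 0 []).getD 0 []).length,
      (((t.getD 0 []).getD 0 []).getD 0 []).length) := by
  rcases t with _ | ⟨t3, ts⟩
  · simp at h1
  rcases t3 with _ | ⟨t2, t3s⟩
  · simp at h2
  rcases t2 with _ | ⟨t1, t2s⟩
  · simp at h3
  simp [pvShape4, PySem.List.pyGet?, PySem.List.pyIdx?]

theorem pv_shapeB4_eq (t : List (List (List (List Int))))
    (h1 : 0 < t.length) (h2 : 0 < (t.getD 0 []).length)
    (h3 : 0 < ((t.getD 0 []).getD 0 []).length) :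
    pvShapeB4 t = some (t.length, (t.getD 0 []).length, ((t.getD 0 []).getD 0 []).length,
      (((t.getD 0 []).getD 0 []).getD 0 []).length) := by
  rcases t with _ | ⟨t3, ts⟩
  · simp at h1
  rcases t3 with _ | ⟨t2, t3s⟩
  · simp at h2
  rcases t2 with _ | ⟨t1, t2s⟩
  · simp at h3
  simp [pvShapeB4, PySem.List.pyGet?, PySem.List.pyIdx?]

theorem pv_getD_mem {α : Type} (t : List α) (d : α) (i : Nat) (h : i < t.length) :
    t.getD i d ∈ t := by
  rw [List.getD_eq_getElem t d h]
  exact List.getElem_mem h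

-- unpacked form of pvRect4
theorem pv_rect4_iff (t : List (List (List (List Int)))) (L K M N : Nat) :
    pvRect4 t L K M N = true ↔ t.length = L ∧ ∀ m3 ∈ t, m3.length = K ∧
      ∀ m2 ∈ m3, m2.length = M ∧ ∀ r ∈ m2, r.length = N := by
  simp [pvRect4, List.all_eq_true]

theorem pv_zipmap {α β γ : Type} (dx : α) (dy : β) (x : List α) (y : List β) (F : α × β → γ)
    (h : y.length = x.length) :
    (x.zip y).map F = (List.range x.length).map (fun i => F (x.getD i dx, y.getD i dy)) := by
  apply List.ext_getElem
  · simp [h]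
  · intro i h1 h2
    have hx : i < x.length := by simp [h] at h1; omega
    have hy : i < y.length := by omega
    simp [List.getElem_zip, List.getElem?_eq_getElem hx, List.getElem?_eq_getElem hy]

-- zip of a mapped list with the list itself
theorem pv_zip_map_self {α β : Type} (g : α → β) (l : List α) :
    (l.map g).zip l = l.map (fun r => (g r, r)) := by
  induction l with
  | nil => rfl
  | cons x t ih => simp [ih]

-- pvAxpy on a range-map accumulator row
theorem pv_axpy_range (f : Nat → Int) (s : Int) (bRow : List Int) (P : Nat)
    (hb : bRow.length = P) :
    pvAxpy ((List.range P).map f) s bRow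
      = (List.range P).map (fun j => f j + s * bRow.getD j 0) := by
  unfold pvAxpy
  rw [pv_zipmap 0 0 _ bRow _ (by simp [hb])]
  simp only [List.length_map, List.length_range]
  apply List.map_congr_left
  intro j hj
  have hjP : j < P := List.mem_range.mp hj
  rw [List.getD_eq_getElem ((List.range P).map f) 0 (by simpa using hjP)]
  simp

-- zipIdx as a range map
theorem pv_zipIdx_range {α : Type} (d : α) (l : List α) :
    l.zipIdx = (List.range l.length).map (fun x => (l.getD x d, x)) := by
  apply List.ext_getElem
  · simp
  · intro i h1 h2
    have hi : i < l.length := by simpa using h1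
    simp [List.getElem?_eq_getElem hi]

-- the rank-1 accumulation loop, characterised entrywise
theorem pv_fold_axpy (ma : List (List Int)) (mbg : Nat → List Int) (P : Nat) (n : Nat)
    (hr : ∀ x, x < n → (mbg x).length = P) :
    ((List.range n).map (fun x => (mbg x, x))).foldl
        (fun acc bx => (acc.zip ma).map (fun q => pvAxpy q.1 (q.2.getD bx.2 0) bx.1))
        (ma.map (fun _ => List.replicate P (0 : Int)))
      = ma.map (fun r => (List.range P).map (fun j =>
          ((List.range n).map (fun x => r.getD x 0 * (mbg x).getD j 0)).foldl
            (fun s v => s + v) 0)) := by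
  induction n with
  | zero =>
    simp only [List.range_zero, List.map_nil, List.foldl_nil]
    apply List.map_congr_left
    intro r _
    rw [show (List.range P).map (fun _ => (0 : Int)) = List.replicate P 0 by simp]
  | succ n ih =>
    rw [List.range_succ, List.map_append, List.foldl_append,
      ih (fun x hx => hr x (by omega))]
    simp only [List.map_cons, List.map_nil, List.foldl_cons, List.foldl_nil]
    rw [pv_zip_map_self, List.map_map]
    apply List.map_congr_left
    intro r _
    simp only [Function.comp_apply]
    rw [pv_axpy_range _ _ _ P (hr n (by omega))]
    apply List.map_congr_left
    intro j _
    simp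

theorem pv_mat2B_eq (ma mb : List (List Int)) (P : Nat) (hne : 0 < mb.length)
    (hrows : ∀ r ∈ mb, r.length = P) :
    pvMat2B ma mb = ma.map (fun r => (List.range P).map (fun j =>
        ((List.range mb.length).map (fun x => r.getD x 0 * (mb.getD x []).getD j 0)).foldl
          (fun s v => s + v) 0)) := by
  have hp : (mb.getD 0 []).length = P := hrows _ (pv_getD_mem mb [] 0 hne)
  unfold pvMat2B
  rw [hp, pv_zipIdx_range ([] : List Int) mb]
  exact pv_fold_axpy ma (fun x => mb.getD x []) P mb.length
    (fun x hx => hrows _ (pv_getD_mem mb [] x hx))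

theorem pv_A_eq_canon (a b : List (List (List (List Int)))) (hp : Pre_matmul_4d a b) :
    matmul_4d a b = pvCanon a b a.length (a.getD 0 []).length
      ((a.getD 0 []).getD 0 []).length (((b.getD 0 []).getD 0 []).getD 0 []).length := by
  obtain ⟨ha, hb, hL, hK, hM, hN, hP⟩ := hp
  rw [pv_rect4_iff] at ha hb
  have hbL : b.length = a.length := hb.1
  have hb0 : b.getD 0 [] ∈ b := pv_getD_mem b [] 0 (by omega)
  have hbK : (b.getD 0 []).length = (a.getD 0 []).length := (hb.2 _ hb0).1
  have hb00 : (b.getD 0 []).getD 0 [] ∈ b.getD 0 [] := pv_getD_mem _ [] 0 (by rw [hbK]; omega)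
  have hbM : ((b.getD 0 []).getD 0 []).length = (((a.getD 0 []).getD 0 []).getD 0 []).length :=
    ((hb.2 _ hb0).2 _ hb00).1
  have hsa : pvShape4 a = some (a.length, (a.getD 0 []).length,
      ((a.getD 0 []).getD 0 []).length, (((a.getD 0 []).getD 0 []).getD 0 []).length) :=
    pv_shape4_eq a hL hK hM
  have hsb : pvShape4 b = some (b.length, (b.getD 0 []).length,
      ((b.getD 0 []).getD 0 []).length, (((b.getD 0 []).getD 0 []).getD 0 []).length) :=
    pv_shape4_eq b (by omega) (by rw [hbK]; omega) (by rw [hbM]; omega)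
  unfold matmul_4d
  rw [hsa, hsb, hbL, hbK, hbM]
  simp only [beq_self_eq_true, Bool.and_self, if_true]
  rw [pv_zeros4 _ _ _ _ hL hK hM hP]
  rw [pv_A_core]
  rfl

theorem pv_B_eq_canon (a b : List (List (List (List Int)))) (hp : Pre_matmul_4d a b) :
    matmul_4d_alt a b = pvCanon a b a.length (a.getD 0 []).length
      ((a.getD 0 []).getD 0 []).length (((b.getD 0 []).getD 0 []).getD 0 []).length := by
  obtain ⟨ha, hb, hL, hK, hM, hN, hP⟩ := hp
  rw [pv_rect4_iff] at ha hb
  have hbL : b.length = a.length := hb.1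
  have hb0 : b.getD 0 [] ∈ b := pv_getD_mem b [] 0 (by omega)
  have hbK : (b.getD 0 []).length = (a.getD 0 []).length := (hb.2 _ hb0).1
  have hb00 : (b.getD 0 []).getD 0 [] ∈ b.getD 0 [] := pv_getD_mem _ [] 0 (by rw [hbK]; omega)
  have hbM : ((b.getD 0 []).getD 0 []).length = (((a.getD 0 []).getD 0 []).getD 0 []).length :=
    ((hb.2 _ hb0).2 _ hb00).1
  have hsa : pvShapeB4 a = some (a.length, (a.getD 0 []).length,
      ((a.getD 0 []).getD 0 []).length, (((a.getD 0 []).getD 0 []).getD 0 []).length) :=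
    pv_shapeB4_eq a hL hK hM
  have hsb : pvShapeB4 b = some (b.length, (b.getD 0 []).length,
      ((b.getD 0 []).getD 0 []).length, (((b.getD 0 []).getD 0 []).getD 0 []).length) :=
    pv_shapeB4_eq b (by omega) (by rw [hbK]; omega) (by rw [hbM]; omega)
  unfold matmul_4d_alt
  rw [hsa, hsb]
  simp only [Option.bind_some, Option.map_some, Option.getD_some, hbL, hbK, hbM,
    beq_self_eq_true, Bool.and_self, if_true]
  -- level 1: the batch zip over l
  rw [pv_zipmap [] [] a b _ hbL]
  unfold pvCanon
  apply List.map_congr_left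
  intro l hl
  have hlL : l < a.length := List.mem_range.mp hl
  have hal : a.getD l [] ∈ a := pv_getD_mem a [] l hlL
  have hbl : b.getD l [] ∈ b := pv_getD_mem b [] l (by omega)
  -- level 2: zip over k
  rw [pv_zipmap [] [] (a.getD l []) (b.getD l []) _ (by rw [(hb.2 _ hbl).1, (ha.2 _ hal).1])]
  rw [(ha.2 _ hal).1]
  apply List.map_congr_left
  intro k hk
  have hkK : k < (a.getD 0 []).length := List.mem_range.mp hk
  have halk : (a.getD l []).getD k [] ∈ a.getD l [] :=
    pv_getD_mem _ [] k (by rw [(ha.2 _ hal).1]; omega)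
  have hblk : (b.getD l []).getD k [] ∈ b.getD l [] :=
    pv_getD_mem _ [] k (by rw [(hb.2 _ hbl).1]; omega)
  have hmaM : ((a.getD l []).getD k []).length = ((a.getD 0 []).getD 0 []).length :=
    ((ha.2 _ hal).2 _ halk).1
  have hmbN : ((b.getD l []).getD k []).length = (((a.getD 0 []).getD 0 []).getD 0 []).length :=
    ((hb.2 _ hbl).2 _ hblk).1
  have hmbrows : ∀ r ∈ (b.getD l []).getD k [], r.length
      = (((b.getD 0 []).getD 0 []).getD 0 []).length :=
    fun r hr => (((hb.2 _ hbl).2 _ hblk).2 _ hr)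
  -- level 3: the rank-1 accumulation equals A's entry sums
  rw [pv_mat2B_eq _ _ (((b.getD 0 []).getD 0 []).getD 0 []).length (by omega) hmbrows]
  rw [pv_map_eq_range_getD ([] : List Int), hmaM]
  apply List.map_congr_left
  intro i hi
  apply List.map_congr_left
  intro j _
  have hrow : ((a.getD l []).getD k []).getD i [] ∈ (a.getD l []).getD k [] :=
    pv_getD_mem _ [] i (by rw [hmaM]; exact List.mem_range.mp hi)
  have hrlen : (((a.getD l []).getD k []).getD i []).length
      = (((a.getD 0 []).getD 0 []).getD 0 []).length :=
    ((ha.2 _ hal).2 _ halk).2 _ hrow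
  simp only [pvEntryA]
  rw [hmbN, hrlen]

-- ===== VERDICT (by name: the statement is the Claim_ definition above) =====
theorem matmul_4d_spec : Claim_equal_matmul_4d := by
  intro a b _hd hp
  unfold Spec_matmul_4d
  rw [pv_A_eq_canon a b hp, pv_B_eq_canon a b hp]
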